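-- pv_equiv track=rewrite | github.com/know-how-schmiede/TasmotaFleet | src/tasmota_scanner.py | _merge_device_infos
-- ===== SOURCE A (Python) =====
-- from typing import Callable, Dict, List, Optional, Sequence
--
-- def _merge_device_infos(infos: List[Dict]) -> Dict:
--     """
--     Combine multiple status payloads, preferring the first non-empty value
--     and replacing default placeholders.
--     """
--     merged: Dict = {}
--     for info in infos:
--         for key, val in info.items():
--             if val in (None, "", []):
--                 continue
--             if key not in merged or merged.get(key) in (None, "", [], "Tasmota Geraet"):
--                 merged[key] = val
--     return merged
-- ===== SOURCE B (Python) =====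
-- def _merge_device_infos(infos):
--     """Two-pass merge: group surviving values per key, then resolve each key."""
--     candidates = {}
--     for info in infos:
--         for key, val in info.items():
--             if val in (None, "", []):
--                 continue
--             candidates.setdefault(key, []).append(val)
--     return {key: next((v for v in vals if v != "Tasmota Geraet"), vals[0])
--             for key, vals in candidates.items()}
-- ===== Notes on version B (the rewrite author's own statement) =====
-- stated objective: alternative
-- what changed: A interleaves collection and selection in a single pass over merged; B first builds an explicit per-key candidate index (grouping all surviving values per key) and then resolves each key in a separate pass by picking the first non-placeholder candidate (falling back to the first candidate).
import Mathlib
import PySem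

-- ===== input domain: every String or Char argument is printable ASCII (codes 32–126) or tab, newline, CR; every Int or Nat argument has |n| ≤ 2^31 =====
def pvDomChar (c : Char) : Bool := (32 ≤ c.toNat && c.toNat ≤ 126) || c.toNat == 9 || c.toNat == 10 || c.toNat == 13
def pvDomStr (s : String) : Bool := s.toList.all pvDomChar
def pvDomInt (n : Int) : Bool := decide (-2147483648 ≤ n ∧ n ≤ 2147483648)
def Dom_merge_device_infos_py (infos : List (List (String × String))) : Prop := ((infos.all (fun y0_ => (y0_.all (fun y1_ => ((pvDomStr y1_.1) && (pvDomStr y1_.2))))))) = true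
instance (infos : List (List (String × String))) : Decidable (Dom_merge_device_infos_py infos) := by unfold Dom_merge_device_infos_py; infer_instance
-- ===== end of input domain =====

-- B changes the decomposition: a first pass groups all surviving values per key, a second pass resolves each key from its candidate list (A interleaves collection and selection in one pass).

-- ===== PORT A =====
-- one step of A's inner loop: skip empty values, overwrite missing/placeholder entries
def pvStepA (merged : PySem.Dict String String) (kv : String × String) : PySem.Dict String String :=
  if kv.2 = "" then merged
  else if merged.contains kv.1 = false ∨ merged.get? kv.1 = none ∨ merged.get? kv.1 = some "" ∨ merged.get? kv.1 = some "Tasmota Geraet"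
  then merged.insert kv.1 kv.2 else merged

def merge_device_infos_py (infos : List (List (String × String))) : List (String × String) :=
  (infos.foldl (fun merged info => info.foldl pvStepA merged) PySem.Dict.empty).items

-- ===== PORT B =====
-- first pass step: candidates.setdefault(key, []).append(val), skipping empty values
def pvStepC (c : PySem.Dict String (List String)) (kv : String × String) : PySem.Dict String (List String) :=
  if kv.2 = "" then c else c.modify kv.1 [] (fun l => l ++ [kv.2])

-- next((v for v in vals if v != "Tasmota Geraet"), vals[0]); vals is never empty here, so the headD default "" is never used
def pvResolve (vals : List String) : String :=
  (vals.find? (fun v => v != "Tasmota Geraet")).getD (vals.headD "")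

def merge_device_infos_py_alt (infos : List (List (String × String))) : List (String × String) :=
  let candidates := infos.foldl (fun c info => info.foldl pvStepC c) PySem.Dict.empty
  (candidates.items.foldl (fun r kv => r.insert kv.1 (pvResolve kv.2)) PySem.Dict.empty).items

-- ===== PRECONDITION & SPEC =====
def Spec_merge_device_infos_py (infos : List (List (String × String))) (out : List (String × String)) : Prop := out = merge_device_infos_py_alt infos
instance (infos : List (List (String × String))) (out : List (String × String)) : Decidable (Spec_merge_device_infos_py infos out) := by unfold Spec_merge_device_infos_py; infer_instance

-- ===== CLAIM (what is proved, stated in full; the proofs are below) =====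
def Claim_equal_merge_device_infos_py : Prop := ∀ (infos : List (List (String × String))), Dom_merge_device_infos_py infos → Spec_merge_device_infos_py infos (merge_device_infos_py infos)

-- ===== LEMMAS AND PROOFS =====

-- the relation between A's merged dict and B's candidates dict
def pvInv (m : PySem.Dict String String) (c : PySem.Dict String (List String)) : Prop :=
  m.items = c.items.map (fun kv => (kv.1, pvResolve kv.2)) ∧ c.keys.Nodup ∧
  ∀ kv ∈ c.items, kv.2 ≠ [] ∧ "" ∉ kv.2

lemma pvModify_eq_insert (d : PySem.Dict String (List String)) (k : String) (f : List String → List String) :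
    d.modify k [] f = d.insert k (f (d.getD k [])) := rfl

lemma pvResolve_singleton (v : String) : pvResolve [v] = v := by
  by_cases h : v = "Tasmota Geraet"
  · simp [pvResolve, List.find?, h]
  · have hb : (v == "Tasmota Geraet") = false := beq_eq_false_iff_ne.mpr h
    simp [pvResolve, List.find?, bne, hb]

lemma pvResolve_mem (vals : List String) (h : vals ≠ []) : pvResolve vals ∈ vals := by
  unfold pvResolve
  cases hf : vals.find? (fun v => v != "Tasmota Geraet") with
  | some w => simpa using List.mem_of_find?_eq_some hf
  | none =>
    cases vals with
    | nil => exact absurd rfl h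
    | cons a t => simp [List.headD]

lemma pvResolve_append (vals : List String) (v : String) (h : vals ≠ []) :
    pvResolve (vals ++ [v]) = if pvResolve vals = "Tasmota Geraet" then v else pvResolve vals := by
  unfold pvResolve
  rw [List.find?_append]
  cases hf : vals.find? (fun v => v != "Tasmota Geraet") with
  | some w =>
    have hw : w ≠ "Tasmota Geraet" := by simpa using List.find?_some hf
    simp [hw]
  | none =>
    have hall : ∀ x ∈ vals, x = "Tasmota Geraet" := by
      intro x hx
      have := List.find?_eq_none.mp hf x hx
      simpa using this
    cases vals with
    | nil => exact absurd rfl h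
    | cons a t =>
      have ha : a = "Tasmota Geraet" := hall a (by simp)
      by_cases hv : v = "Tasmota Geraet"
      · simp [List.find?, hv, ha, List.headD]
      · have hb : (v == "Tasmota Geraet") = false := beq_eq_false_iff_ne.mpr hv
        simp [List.find?, bne, hb, ha, List.headD]

lemma pvInv_keys {m : PySem.Dict String String} {c : PySem.Dict String (List String)}
    (h : m.items = c.items.map (fun kv => (kv.1, pvResolve kv.2))) : m.keys = c.keys := by
  simp only [PySem.Dict.keys, h, List.map_map]
  rfl

lemma pvStep_preserves (m : PySem.Dict String String) (c : PySem.Dict String (List String))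
    (h : pvInv m c) (kv : String × String) : pvInv (pvStepA m kv) (pvStepC c kv) := by
  obtain ⟨hitems, hnd, hvals⟩ := h
  obtain ⟨k, v⟩ := kv
  by_cases hv : v = ""
  · simpa [pvStepA, pvStepC, hv] using ⟨hitems, hnd, hvals⟩
  · have hkeys : m.keys = c.keys := pvInv_keys hitems
    have hmnd : m.keys.Nodup := hkeys ▸ hnd
    have hcont : m.contains k = c.contains k := by
      rw [PySem.Dict.contains_eq_decide_mem_keys, PySem.Dict.contains_eq_decide_mem_keys, hkeys]
    by_cases hc : c.contains k = true
    · -- key already present: c has an entry (k, vals), m has (k, pvResolve vals)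
      obtain ⟨vals, hget⟩ : ∃ vals, c.get? k = some vals := by
        have := PySem.Dict.contains_eq_isSome_get? (d := c) (k := k)
        rw [hc] at this
        exact Option.isSome_iff_exists.mp this.symm
      have hmem : (k, vals) ∈ c.items := PySem.Dict.mem_items_of_get?_eq_some c hget
      have hvk : vals ≠ [] ∧ "" ∉ vals := hvals _ hmem
      have hmget : m.get? k = some (pvResolve vals) := by
        refine PySem.Dict.get?_of_mem_items m ?_ hmnd
        rw [hitems]
        exact List.mem_map.mpr ⟨(k, vals), hmem, rfl⟩
      have hrne : pvResolve vals ≠ "" := by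
        intro hcontra
        exact hvk.2 (hcontra ▸ pvResolve_mem vals hvk.1)
      have hgetD : c.getD k [] = vals := PySem.Dict.getD_of_get?_eq_some c [] hget
      have huniq : ∀ p ∈ c.items, p.1 = k → p.2 = vals := by
        intro p hp hpk
        have := PySem.Dict.get?_of_mem_items c hp hnd
        rw [hpk, hget] at this
        exact (Option.some.injEq _ _).mp this.symm
      have hcitems : (pvStepC c (k, v)).items
          = c.items.map (fun p => if p.1 == k then (k, vals ++ [v]) else p) := by
        simp only [pvStepC, hv, pvModify_eq_insert, hgetD]
        exact PySem.Dict.items_insert_of_contains c _ hc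
      have hmc : m.contains k = true := hcont ▸ hc
      refine ⟨?_, ?_, ?_⟩
      · -- items of the stepped dicts still related
        by_cases hr : pvResolve vals = "Tasmota Geraet"
        · have : pvStepA m (k, v) = m.insert k v := by
            simp [pvStepA, hv, hmget, hr]
          rw [this, hcitems, PySem.Dict.items_insert_of_contains m _ hmc, hitems,
            List.map_map, List.map_map]
          apply List.map_congr_left
          intro p hp
          by_cases hpk : p.1 = k
          · have hp2 : p.2 = vals := huniq p hp hpk
            simp [Function.comp, hpk, pvResolve_append vals v hvk.1, hr]
          · simp [Function.comp, hpk]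
        · have : pvStepA m (k, v) = m := by
            have hcf : ¬ (m.contains k = false) := by simp [hmc]
            simp [pvStepA, hv, hmget, hr, hcf, hrne]
          rw [this, hcitems, hitems, List.map_map]
          apply List.map_congr_left
          intro p hp
          by_cases hpk : p.1 = k
          · have hp2 : p.2 = vals := huniq p hp hpk
            have hpp : p = (k, vals) := Prod.ext hpk hp2
            simp [Function.comp, hpp, pvResolve_append vals v hvk.1, hr]
          · simp [Function.comp, hpk]
      · -- keys unchanged, still nodup
        have : (pvStepC c (k, v)).keys = c.keys := by
          simp only [pvStepC, hv, pvModify_eq_insert]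
          exact PySem.Dict.keys_insert_of_contains c _ hc
        rw [this]; exact hnd
      · intro p hp
        rw [hcitems] at hp
        obtain ⟨q, hq, hqe⟩ := List.mem_map.mp hp
        by_cases hqk : q.1 = k
        · have : p = (k, vals ++ [v]) := by simpa [hqk] using hqe.symm
          rw [this]
          constructor
          · simp
          · simp only [List.mem_append, List.mem_singleton]
            rintro (h1 | h2)
            · exact hvk.2 h1
            · exact hv h2.symm
        · have : p = q := by simpa [hqk] using hqe.symm
          exact this ▸ hvals q hq
    · -- fresh key: both dicts append
      have hcf : c.contains k = false := by simpa using hc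
      have hmf : m.contains k = false := by rw [hcont]; exact hcf
      have hgetD : c.getD k [] = [] := PySem.Dict.getD_of_not_contains c [] hcf
      have hA : pvStepA m (k, v) = m.insert k v := by simp [pvStepA, hv, hmf]
      have hC : pvStepC c (k, v) = c.insert k [v] := by
        simp [pvStepC, hv, pvModify_eq_insert, hgetD]
      refine ⟨?_, ?_, ?_⟩
      · rw [hA, hC, PySem.Dict.items_insert_of_not_contains m _ hmf,
          PySem.Dict.items_insert_of_not_contains c _ hcf, hitems]
        simp [pvResolve_singleton]
      · rw [hC, PySem.Dict.keys_insert_of_not_contains c _ hcf]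
        refine List.Nodup.append hnd (by simp) ?_
        intro x hx hxk
        simp only [List.mem_singleton] at hxk
        subst hxk
        rw [← PySem.Dict.contains_iff_mem_keys] at hx
        rw [hx] at hcf
        simp at hcf
      · rw [hC] at *
        intro p hp
        rw [PySem.Dict.items_insert_of_not_contains c _ hcf] at hp
        rcases List.mem_append.mp hp with h1 | h2
        · exact hvals p h1
        · simp only [List.mem_singleton] at h2
          subst h2
          refine ⟨by simp, ?_⟩
          simp only [List.mem_singleton]
          intro hcontra
          exact hv hcontra.symm

lemma pvFold_preserves (l : List (String × String)) :
    ∀ (m : PySem.Dict String String) (c : PySem.Dict String (List String)),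
    pvInv m c → pvInv (l.foldl pvStepA m) (l.foldl pvStepC c) := by
  induction l with
  | nil => intro m c h; simpa using h
  | cons kv t ih =>
    intro m c h
    exact ih _ _ (pvStep_preserves m c h kv)

lemma pvInv_empty : pvInv PySem.Dict.empty PySem.Dict.empty := by
  refine ⟨rfl, ?_, ?_⟩ <;> simp [PySem.Dict.empty, PySem.Dict.keys]

-- ===== VERDICT (by name: the statement is the Claim_ definition above) =====
theorem merge_device_infos_py_spec : Claim_equal_merge_device_infos_py := by
  intro infos _
  unfold Spec_merge_device_infos_py merge_device_infos_py merge_device_infos_py_alt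
  rw [show (infos.foldl (fun merged info => info.foldl pvStepA merged) PySem.Dict.empty)
        = infos.flatten.foldl pvStepA PySem.Dict.empty from List.foldl_flatten.symm,
      show (infos.foldl (fun c info => info.foldl pvStepC c) PySem.Dict.empty)
        = infos.flatten.foldl pvStepC PySem.Dict.empty from List.foldl_flatten.symm]
  obtain ⟨hitems, hnd, _⟩ := pvFold_preserves infos.flatten _ _ pvInv_empty
  set c := infos.flatten.foldl pvStepC PySem.Dict.empty with hc
  rw [hitems]
  rw [PySem.Dict.items_foldl_insert_fresh (k := Prod.fst) (v := fun kv => pvResolve kv.2)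
      (d := PySem.Dict.empty) (l := c.items) ?_ ?_]
  · rfl
  · intro a _; exact PySem.Dict.contains_empty _
  · exact hnd
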